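-- pv_equiv track=rewrite | github.com/JennyDong10152/LC | easy/1351. Count Negative Numbers in a Sorted Matrix.py | search
-- ===== SOURCE A (Python) =====
-- def search(row):
--     left = 0
--     right = len(row)
--
--     while left < right:
--         mid = left + (right-left)//2
--         midV = row[mid]
--         if midV >= 0:
--             left = mid + 1
--         else:
--             right = mid
--     return left
-- ===== SOURCE B (Python) =====
-- def search(row):
--     # Binary search reformulated as structural recursion on list slices:
--     # carry an offset plus the remaining segment instead of (left, right) indices.
--     def go(offset, seg):
--         if not seg:
--             return offset
--         mid = len(seg) // 2
--         if seg[mid] >= 0: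
--             return go(offset + mid + 1, seg[mid + 1:])
--         return go(offset, seg[:mid])
--     return go(0, row)
-- ===== Notes on version B (the rewrite author's own statement) =====
-- stated objective: alternative
-- what changed: The index-pair while loop is replaced by structural recursion on list slices: a helper carries an offset and the remaining segment, indexing the segment at its own midpoint and recursing on seg[mid+1:] or seg[:mid], preserving the exact partition.
import Mathlib
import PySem

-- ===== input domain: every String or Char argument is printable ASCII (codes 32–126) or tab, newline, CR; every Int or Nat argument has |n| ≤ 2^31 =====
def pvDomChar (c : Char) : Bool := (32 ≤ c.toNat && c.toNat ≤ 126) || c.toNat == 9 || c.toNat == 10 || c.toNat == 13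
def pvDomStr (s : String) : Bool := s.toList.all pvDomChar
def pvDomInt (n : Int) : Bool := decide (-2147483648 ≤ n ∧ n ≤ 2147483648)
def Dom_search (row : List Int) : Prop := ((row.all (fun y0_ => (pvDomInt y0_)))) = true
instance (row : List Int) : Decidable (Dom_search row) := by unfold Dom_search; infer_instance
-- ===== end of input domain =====

-- B replaces A's (left, right) index loop by structural recursion on list slices
-- (offset + remaining segment), keeping the same partition (objective: alternative).

-- ===== PORT A =====
-- A's while loop: state (left, right), both always in [0, row.length]; mid is in
-- range whenever left < right ≤ row.length, so getD 0 equals Python's row[mid] there.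
def searchLoop (row : List Int) (left right : Nat) : Nat :=
  if left < right then
    let mid := left + (right - left) / 2
    let midV := row.getD mid 0
    if midV ≥ 0 then searchLoop row (mid + 1) right
    else searchLoop row left mid
  else left
termination_by right - left
decreasing_by
  · omega
  · omega

def search (row : List Int) : Int := (searchLoop row 0 row.length : Int)

-- ===== PORT B =====
-- Source B's go(offset, seg): recursion on the segment; seg[mid] is always in range
-- (0 ≤ len/2 < len for nonempty seg), so getD 0 is exact; slices via take/drop.
def searchGo (offset : Nat) (seg : List Int) : Nat :=
  if seg.length = 0 then offset
  else
    let mid := seg.length / 2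
    if seg.getD mid 0 ≥ 0 then searchGo (offset + mid + 1) (seg.drop (mid + 1))
    else searchGo offset (seg.take mid)
termination_by seg.length
decreasing_by
  · simp only [List.length_drop]; omega
  · simp only [List.length_take]; omega

def search_alt (row : List Int) : Int := (searchGo 0 row : Int)

-- ===== PRECONDITION & SPEC =====
def Spec_search (row : List Int) (out : Int) : Prop := out = search_alt row
instance (row : List Int) (out : Int) : Decidable (Spec_search row out) := by unfold Spec_search; infer_instance

-- ===== CLAIM (what is proved, stated in full; the proofs are below) =====
def Claim_equal_search : Prop := ∀ (row : List Int), Dom_search row → Spec_search row (search row)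

-- ===== LEMMAS AND PROOFS =====
theorem loop_step (row : List Int) (l r : Nat) (h : l < r) :
    searchLoop row l r =
      (if row.getD (l + (r - l) / 2) 0 ≥ 0 then searchLoop row (l + (r - l) / 2 + 1) r
       else searchLoop row l (l + (r - l) / 2)) := by
  rw [searchLoop]
  simp only [if_pos h]

theorem go_step (off : Nat) (seg : List Int) (h : seg.length ≠ 0) :
    searchGo off seg =
      (if seg.getD (seg.length / 2) 0 ≥ 0 then
         searchGo (off + seg.length / 2 + 1) (seg.drop (seg.length / 2 + 1))
       else searchGo off (seg.take (seg.length / 2))) := by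
  rw [searchGo]
  simp only [if_neg h]

theorem getD_slice (row : List Int) (l k m : Nat) (hm : m < k) :
    ((row.drop l).take k).getD m 0 = row.getD (l + m) 0 := by
  simp [List.getD, hm, List.getElem?_drop]

theorem loop_eq_go (row : List Int) (l r : Nat) :
    l ≤ r → r ≤ row.length →
    searchLoop row l r = searchGo l ((row.drop l).take (r - l)) := by
  induction l, r using searchLoop.induct row with
  | case1 l r h mid midV hpos ih =>
    intro hlr hr
    have hlen : ((row.drop l).take (r - l)).length = r - l := by
      simp [List.length_take, List.length_drop]; omega
    have hpos' : row.getD (l + (r - l) / 2) 0 ≥ 0 := hpos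
    rw [loop_step row l r h, go_step l _ (by omega : ((row.drop l).take (r - l)).length ≠ 0)]
    rw [hlen, getD_slice row l (r - l) ((r - l) / 2) (by omega)]
    rw [if_pos hpos', if_pos hpos']
    rw [ih (by simp only [mid]; omega) hr]
    have e2 : ((row.drop l).take (r - l)).drop ((r - l) / 2 + 1)
        = (row.drop (l + (r - l) / 2 + 1)).take (r - (l + (r - l) / 2 + 1)) := by
      rw [List.drop_take, List.drop_drop]
      congr 1 <;> omega
    rw [e2]
  | case2 l r h mid midV hneg ih =>
    intro hlr hr
    have hlen : ((row.drop l).take (r - l)).length = r - l := by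
      simp [List.length_take, List.length_drop]; omega
    have hneg' : ¬ row.getD (l + (r - l) / 2) 0 ≥ 0 := hneg
    rw [loop_step row l r h, go_step l _ (by omega : ((row.drop l).take (r - l)).length ≠ 0)]
    rw [hlen, getD_slice row l (r - l) ((r - l) / 2) (by omega)]
    rw [if_neg hneg', if_neg hneg']
    rw [ih (by simp only [mid]; omega) (by simp only [mid]; omega)]
    have e3 : min ((r - l) / 2) (r - l) = mid - l := by simp only [mid]; omega
    rw [List.take_take, e3]
  | case3 l r h =>
    intro _ _
    rw [searchLoop, searchGo]
    have : r - l = 0 := by omega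
    simp [this, if_neg h]

-- ===== VERDICT (by name: the statement is the Claim_ definition above) =====
theorem search_spec : Claim_equal_search := by
  intro row _
  unfold Spec_search search search_alt
  rw [loop_eq_go row 0 row.length (by omega) (le_refl _)]
  simp
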